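-- pv_equiv track=rewrite | github.com/elin-d/SmartCatalog_Editor | tools.py | convert_list_attribute_number
-- ===== SOURCE A (Python) =====
-- def convert_list_attribute_number(number_list: list) -> list:
--     number_list_new = list()
--
--     if not isinstance(number_list, list):
--         return number_list_new
--
--     if len(number_list) == 0:
--         return number_list_new
--
--     for number in number_list:
--
--         try:
--             number = str(int(number))
--         except Exception:
--             continue
--
--         if number in number_list_new:
--             continue
--
--         if len(number) > 5:
--             continue
--
--         number_list_new.append(number)
--
--     number_list_new.sort(key=int)
--
--     return number_list_new
-- ===== SOURCE B (Python) =====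
-- def convert_list_attribute_number(number_list: list) -> list:
--     result = []
--
--     if not isinstance(number_list, list):
--         return result
--
--     seen = set()
--     for item in number_list:
--         try:
--             v = int(item)
--         except Exception:
--             continue
--         s = str(v)
--         if len(s) > 5 or s in seen:
--             continue
--         seen.add(s)
--         # keep `result` sorted numerically at all times: insert s before the
--         # first element with a strictly larger numeric value
--         i = 0
--         while i < len(result) and int(result[i]) <= v:
--             i += 1
--         result.insert(i, s)
--     return result
-- ===== Notes on version B (the rewrite author's own statement) =====
-- stated objective: alternative
-- what changed: Instead of appending with a linear membership scan and sorting the whole list at the end, B makes a single pass that dedupes via a hash set and maintains the output numerically sorted by inserting each new canonical number at its sorted position (online insertion sort); there is no final sort call.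
import Mathlib
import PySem

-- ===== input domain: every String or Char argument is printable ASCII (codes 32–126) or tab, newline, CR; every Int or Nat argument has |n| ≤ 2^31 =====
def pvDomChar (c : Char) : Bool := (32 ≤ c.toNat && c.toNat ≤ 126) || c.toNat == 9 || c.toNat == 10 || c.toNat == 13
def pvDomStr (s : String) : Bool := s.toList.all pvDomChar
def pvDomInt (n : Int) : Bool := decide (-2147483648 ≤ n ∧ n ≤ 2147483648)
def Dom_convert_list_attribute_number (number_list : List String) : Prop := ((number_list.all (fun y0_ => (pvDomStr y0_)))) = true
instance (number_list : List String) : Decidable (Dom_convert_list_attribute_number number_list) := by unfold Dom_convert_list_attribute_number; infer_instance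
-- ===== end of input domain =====

-- B replaces A's append-with-membership-scan + final library sort by a single pass that
-- dedupes via a set and keeps the output numerically sorted by online insertion (objective: alternative).

-- ===== PORT A =====
-- Python's sort key `int` applied to an element of number_list_new: every such element is
-- str(int(x)) of some input, so int() on it always succeeds; `.getD 0` is never the
-- none-branch on the values this key is applied to (exact on all inputs of the port).
def convert_list_attribute_number (number_list : List String) : List String :=
  if number_list.length = 0 then []
  else
    let acc := number_list.foldl (fun acc number =>
      match PySem.Int.ofStr? number with
      | none => acc
      | some n =>
        let number := PySem.Int.toStr n
        if number ∈ acc then acc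
        else if PySem.Str.len number > 5 then acc
        else acc ++ [number]) ([] : List String)
    PySem.List.sorted acc (fun s => (PySem.Int.ofStr? s).getD 0)

-- ===== PORT B =====
-- int(s) on a canonical string s = str(v): `.getD 0` never takes the none-branch there (exact).
def pvKey (s : String) : Int := (PySem.Int.ofStr? s).getD 0

-- the `while i < len(result) and int(result[i]) <= v` scan followed by `result.insert(i, s)`
def pvInsert (v : Int) (s : String) : List String → List String
  | [] => [s]
  | y :: ys => if pvKey y ≤ v then y :: pvInsert v s ys else s :: y :: ys

def convert_list_attribute_number_alt (number_list : List String) : List String :=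
  (number_list.foldl (fun (st : PySem.Set String × List String) item =>
    match PySem.Int.ofStr? item with
    | none => st
    | some v =>
      let s := PySem.Int.toStr v
      if PySem.Str.len s > 5 || PySem.Set.contains st.1 s then st
      else (PySem.Set.add st.1 s, pvInsert (pvKey s) s st.2))
    ((PySem.Set.empty : PySem.Set String), ([] : List String))).2

-- ===== PRECONDITION & SPEC =====
def Spec_convert_list_attribute_number (number_list : List String) (out : List String) : Prop := out = convert_list_attribute_number_alt number_list
instance (number_list : List String) (out : List String) : Decidable (Spec_convert_list_attribute_number number_list out) := by unfold Spec_convert_list_attribute_number; infer_instance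

-- ===== CLAIM (what is proved, stated in full; the proofs are below) =====
def Claim_equal_convert_list_attribute_number : Prop := ∀ (number_list : List String), Dom_convert_list_attribute_number number_list → Spec_convert_list_attribute_number number_list (convert_list_attribute_number number_list)

-- ===== LEMMAS AND PROOFS =====

-- A's key, as a named function
theorem pvKey_eq : (fun s => (PySem.Int.ofStr? s).getD 0) = pvKey := rfl

-- the sorted list that A's final `sort` produces from acc, in insertBy-fold form
def pvSortedOf (acc : List String) : List String :=
  acc.foldl (fun l s => PySem.List.insertBy (fun a b => decide (pvKey a < pvKey b)) s l) []

theorem pvInsert_eq_insertBy (s : String) (l : List String) :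
    pvInsert (pvKey s) s l = PySem.List.insertBy (fun a b => decide (pvKey a < pvKey b)) s l := by
  induction l with
  | nil => rfl
  | cons y ys ih =>
    simp only [pvInsert, PySem.List.insertBy]
    by_cases h : pvKey y ≤ pvKey s
    · rw [if_pos h, if_neg (by simpa using h), ih]
    · rw [if_neg h, if_pos (by simpa using lt_of_not_ge h)]

theorem pvSortedOf_append (acc : List String) (s : String) :
    pvSortedOf (acc ++ [s]) = pvInsert (pvKey s) s (pvSortedOf acc) := by
  simp [pvSortedOf, pvInsert_eq_insertBy]

-- A's loop body and B's loop body, named for the induction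
def pvStepA (acc : List String) (number : String) : List String :=
  match PySem.Int.ofStr? number with
  | none => acc
  | some n =>
    let number := PySem.Int.toStr n
    if number ∈ acc then acc
    else if PySem.Str.len number > 5 then acc
    else acc ++ [number]

def pvStepB (st : PySem.Set String × List String) (item : String) : PySem.Set String × List String :=
  match PySem.Int.ofStr? item with
  | none => st
  | some v =>
    let s := PySem.Int.toStr v
    if PySem.Str.len s > 5 || PySem.Set.contains st.1 s then st
    else (PySem.Set.add st.1 s, pvInsert (pvKey s) s st.2)

theorem pvStep_eq (acc : List String) (x : String) :
    pvStepB (acc, pvSortedOf acc) x = (pvStepA acc x, pvSortedOf (pvStepA acc x)) := by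
  simp only [pvStepA, pvStepB]
  cases h : PySem.Int.ofStr? x with
  | none => rfl
  | some n =>
    by_cases hmem : PySem.Int.toStr n ∈ acc <;>
    by_cases hlen : 5 < (PySem.Int.toChars n).length <;>
    simp [hmem, hlen, PySem.Set.add, PySem.Set.contains, pvSortedOf_append]

theorem pvLoop_eq (xs : List String) : ∀ (acc : List String),
    xs.foldl pvStepB (acc, pvSortedOf acc) = (xs.foldl pvStepA acc, pvSortedOf (xs.foldl pvStepA acc)) := by
  induction xs with
  | nil => intro acc; rfl
  | cons x xs ih =>
    intro acc
    simp only [List.foldl_cons, pvStep_eq acc x]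
    exact ih (pvStepA acc x)

-- ===== VERDICT (by name: the statement is the Claim_ definition above) =====
theorem convert_list_attribute_number_spec : Claim_equal_convert_list_attribute_number := by
  intro number_list _
  show convert_list_attribute_number number_list = convert_list_attribute_number_alt number_list
  cases number_list with
  | nil => rfl
  | cons x xs =>
    show PySem.List.sorted ((x :: xs).foldl pvStepA []) (fun s => (PySem.Int.ofStr? s).getD 0)
        = ((x :: xs).foldl pvStepB (PySem.Set.empty, [])).2
    rw [show ((x :: xs).foldl pvStepB ((PySem.Set.empty : PySem.Set String), ([] : List String)))
        = ((x :: xs).foldl pvStepB (([] : List String), pvSortedOf [])) from rfl,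
      pvLoop_eq (x :: xs) []]
    rw [pvKey_eq, PySem.List.sorted_eq_foldl_insertBy]
    rfl
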